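-- pv_equiv track=rewrite | github.com/YashB63/GFG-Daily-Questions | Day 37/Search Pattern (KMP-Algorithm)/kmp.py | search
-- ===== SOURCE A (Python) =====
-- def search(pat, txt):
--
--     res = []
--     i = 0
--     while i != -1:
--         i = txt.find(pat, i)
--         if i == -1:
--             break
--         i += 1
--         res.append(i)
--     return res
-- ===== SOURCE B (Python) =====
-- def search(pat, txt):
--     m = len(pat)
--     return [i + 1 for i in range(len(txt) - m + 1) if txt[i:i + m] == pat]
-- ===== Notes on version B (the rewrite author's own statement) =====
-- stated objective: simpler
-- what changed: Replaced the stateful while-loop that repeatedly resumes str.find from the previous hit (mutating the scan index and breaking on -1) by a single comprehension over all candidate start positions that keeps i+1 whenever txt[i:i+len(pat)] == pat; the empty pattern falls out naturally with no special case.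
import Mathlib
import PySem

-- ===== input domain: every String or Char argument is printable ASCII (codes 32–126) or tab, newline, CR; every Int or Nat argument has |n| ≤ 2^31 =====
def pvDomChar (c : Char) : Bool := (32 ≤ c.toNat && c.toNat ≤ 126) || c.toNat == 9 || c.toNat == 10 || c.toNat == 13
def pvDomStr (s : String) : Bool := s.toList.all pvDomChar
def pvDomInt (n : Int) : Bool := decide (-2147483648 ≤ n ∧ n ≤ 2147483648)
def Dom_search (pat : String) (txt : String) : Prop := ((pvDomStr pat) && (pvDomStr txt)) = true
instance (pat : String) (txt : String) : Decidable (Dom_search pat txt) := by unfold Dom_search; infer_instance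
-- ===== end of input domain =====

-- B replaces A's resume-from-last-hit find loop by one comprehension over all start
-- positions (objective: simpler; same asymptotic cost).

-- ===== PORT A =====
-- A's while-loop: i = txt.find(pat, i); break on -1; i += 1; res.append(i).
-- The fuel only bounds the iteration count (the loop runs at most len(txt)+2 times,
-- since the scan index strictly grows and find past the end returns -1).
def searchLoopA (p t : List Char) : Int → Nat → List Int
  | _, 0 => []
  | i, fuel + 1 =>
    let j := PySem.Chars.findFrom t p i
    if j = -1 then []
    else (j + 1) :: searchLoopA p t (j + 1) fuel

def search (pat : String) (txt : String) : List Int :=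
  searchLoopA pat.toList txt.toList 0 (txt.toList.length + 2)

-- ===== PORT B =====
-- Source B: [i + 1 for i in range(len(txt) - m + 1) if txt[i:i + m] == pat]
def search_alt (pat : String) (txt : String) : List Int :=
  let p := pat.toList
  let t := txt.toList
  let m : Int := p.length
  ((PySem.List.pyRange 0 ((t.length : Int) - m + 1) 1).filter
      (fun i => decide (PySem.List.slice t (some i) (some (i + m)) = p))).map
    (fun i => i + 1)

-- ===== PRECONDITION & SPEC =====
def Spec_search (pat : String) (txt : String) (out : List Int) : Prop := out = search_alt pat txt
instance (pat : String) (txt : String) (out : List Int) : Decidable (Spec_search pat txt out) := by unfold Spec_search; infer_instance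

-- ===== CLAIM (what is proved, stated in full; the proofs are below) =====
def Claim_equal_search : Prop := ∀ (pat : String) (txt : String), Dom_search pat txt → Spec_search pat txt (search pat txt)

-- ===== LEMMAS AND PROOFS =====

-- canonical form both sides are reduced to
def matchesUpTo (p t : List Char) (k b : Nat) : List Int :=
  ((List.range' k b).filter (fun i => decide (p <+: t.drop i))).map (fun i => (Int.ofNat i) + 1)

theorem findFrom_past_end (t p : List Char) :
    PySem.Chars.findFrom t p ((t.length : Int) + 1) none = -1 := by
  simp [PySem.Chars.findFrom]
  intro h
  omega

theorem not_prefix_drop_of_not_infix {p t : List Char} {k i : Nat}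
    (h : ¬ p <:+: t.drop k) (hki : k ≤ i) : ¬ p <+: t.drop i := by
  intro hp
  apply h
  have hd : t.drop i = (t.drop k).drop (i - k) := by
    rw [List.drop_drop]; congr 1; omega
  rw [hd] at hp
  exact hp.isInfix.trans (List.drop_suffix _ _).isInfix

theorem loopA_eq (p t : List Char) :
    ∀ (fuel k : Nat), k ≤ t.length + 1 → t.length + 2 - k ≤ fuel →
      searchLoopA p t (k : Int) fuel = matchesUpTo p t k (t.length + 1 - k) := by
  intro fuel
  induction fuel with
  | zero => intro k hk hf; omega
  | succ fuel ih =>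
    intro k hk hf
    by_cases hke : k = t.length + 1
    · subst hke
      simp only [searchLoopA]
      rw [show ((t.length + 1 : Nat) : Int) = (t.length : Int) + 1 by push_cast; ring]
      rw [findFrom_past_end]
      simp [matchesUpTo]
    · have hk' : k ≤ t.length := by omega
      simp only [searchLoopA]
      by_cases hj : PySem.Chars.findFrom t p (k : Int) = -1
      · rw [hj, if_pos rfl]
        have hninf := (PySem.Chars.findFrom_natCast_eq_neg_one_iff t p k hk').mp hj
        symm
        simp only [matchesUpTo, List.map_eq_nil_iff, List.filter_eq_nil_iff]
        intro i hi
        rw [List.mem_range'_1] at hi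
        simp only [decide_eq_true_eq]
        exact not_prefix_drop_of_not_infix hninf hi.1
      · obtain ⟨hkj, hpre, hmin⟩ := PySem.Chars.findFrom_natCast_spec t p k hk' hj
        rw [if_neg hj]
        set j := PySem.Chars.findFrom t p (k : Int) with hjdef
        have hjle : j ≤ (t.length : Int) := by
          have hfl := PySem.Chars.find_le_length (t.drop k) p
          have hld : (t.drop k).length = t.length - k := List.length_drop ..
          rw [hjdef, PySem.Chars.findFrom_natCast t p k hk']
          split_ifs with h
          · omega
          · omega
        have hjcast : j = (j.toNat : Int) := by omega
        set jn := j.toNat with hjn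
        have hkjn : k ≤ jn := by omega
        have hjnle : jn ≤ t.length := by omega
        have hrec : searchLoopA p t (j + 1) fuel
            = matchesUpTo p t (jn + 1) (t.length + 1 - (jn + 1)) := by
          rw [hjcast, show ((jn : Int) + 1) = ((jn + 1 : Nat) : Int) by push_cast; ring]
          exact ih (jn + 1) (by omega) (by omega)
        rw [hrec]
        unfold matchesUpTo
        have hsplit : List.range' k (t.length + 1 - k)
            = List.range' k (jn - k) ++ jn :: List.range' (jn + 1) (t.length - jn) := by
          rw [show t.length + 1 - k = (jn - k) + ((t.length - jn) + 1) by omega,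
            ← List.range'_append, show k + 1 * (jn - k) = jn by omega, List.range'_succ]
        rw [hsplit, List.filter_append]
        have h1 : List.filter (fun i => decide (p <+: t.drop i)) (List.range' k (jn - k)) = [] := by
          rw [List.filter_eq_nil_iff]
          intro i hi
          rw [List.mem_range'_1] at hi
          simp only [decide_eq_true_eq]
          exact hmin i hi.1 (by omega)
        rw [h1, List.nil_append, List.filter_cons_of_pos (by simpa using hpre), List.map_cons]
        rw [hjcast]
        push_cast
        rfl

theorem alt_eq (p t : List Char) :
    ((PySem.List.pyRange 0 ((t.length : Int) - (p.length : Int) + 1) 1).filter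
        (fun i => decide (PySem.List.slice t (some i) (some (i + (p.length : Int))) = p))).map
      (fun i => i + 1) = matchesUpTo p t 0 (t.length + 1) := by
  rw [PySem.List.pyRange_one, List.filter_map, List.map_map]
  have hpred : ∀ i ∈ List.range ((t.length : Int) - (p.length : Int) + 1 - 0).toNat,
      ((fun i => decide (PySem.List.slice t (some i) (some (i + (p.length : Int))) = p)) ∘
        (fun k : Nat => (0 : Int) + k)) i = decide (p <+: t.drop i) := by
    intro i _
    simp only [Function.comp, zero_add, PySem.List.slice_natCast_add, decide_eq_decide]
    rw [List.prefix_iff_eq_take, eq_comm]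
  rw [List.filter_congr hpred]
  have hrange : (List.range ((t.length : Int) - (p.length : Int) + 1 - 0).toNat).filter
        (fun i => decide (p <+: t.drop i))
      = (List.range' 0 (t.length + 1)).filter (fun i => decide (p <+: t.drop i)) := by
    set b := ((t.length : Int) - (p.length : Int) + 1 - 0).toNat with hb
    have hble : b ≤ t.length + 1 := by omega
    rw [List.range_eq_range',
      show t.length + 1 = b + (t.length + 1 - b) by omega, ← List.range'_append,
      List.filter_append, show (0 : Nat) + 1 * b = b by omega]
    have h2 : (List.range' b (t.length + 1 - b)).filter (fun i => decide (p <+: t.drop i)) = [] := by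
      rw [List.filter_eq_nil_iff]
      intro i hi
      rw [List.mem_range'_1] at hi
      simp only [decide_eq_true_eq]
      intro hp
      have hlen := hp.length_le
      rw [List.length_drop] at hlen
      omega
    rw [h2, List.append_nil]
  rw [hrange]
  unfold matchesUpTo
  refine List.map_congr_left fun i _ => ?_
  simp [Int.ofNat_eq_natCast]

-- ===== VERDICT (by name: the statement is the Claim_ definition above) =====
theorem search_spec : Claim_equal_search := by
  intro pat txt _
  unfold Spec_search search search_alt
  rw [show (0 : Int) = ((0 : Nat) : Int) from rfl,
    loopA_eq pat.toList txt.toList _ 0 (by omega) (by omega)]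
  exact (alt_eq pat.toList txt.toList).symm
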